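-- pv_equiv track=rewrite | github.com/microsoft/onnxruntime-genai | test/python/models/fast/ext_test_case.py | first_token_diff
-- ===== SOURCE A (Python) =====
-- from typing import Any, Union
--
-- def edit_distance(str1, str2) -> int:
--     m, n = len(str1), len(str2)
--
--     # Create a DP table
--     dp = [[0] * (n + 1) for _ in range(m + 1)]
--
--     # Initialize base cases
--     for i in range(m + 1):
--         dp[i][0] = i  # Deletions
--     for j in range(n + 1):
--         dp[0][j] = j  # Insertions
--
--     # Fill the table
--     for i in range(1, m + 1):
--         for j in range(1, n + 1):
--             if str1[i - 1] == str2[j - 1]: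
--                 cost = 0
--             else:
--                 cost = 1
--
--             dp[i][j] = min(
--                 dp[i - 1][j] + 1, dp[i][j - 1] + 1, dp[i - 1][j - 1] + cost
--             )  # Deletion  # Insertion  # Substitution
--
--     return dp[m][n]
--
-- def first_token_diff(expected: list[int], values: list[int]) -> dict[str, Any]:
--     delta_length = len(values) - len(expected)
--     first_diff = None
--     for i, (a, b) in enumerate(zip(expected, values)):
--         if a != b:
--             if first_diff is None:
--                 first_diff = i
--                 break
--     total_diff = edit_distance(expected, values)
--     return dict(first_diff=first_diff, delta_length=delta_length, expected_length=len(expected), total_diff=total_diff)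
-- ===== SOURCE B (Python) =====
-- def first_token_diff(expected: list[int], values: list[int]) -> dict:
--     m, n = len(expected), len(values)
--     # demand-driven edit distance: evaluate cells of the Levenshtein recurrence
--     # top-down with an explicit work stack and a dict cache (no (m+1)x(n+1) table,
--     # no Python recursion); each cell is expanded at most once.
--     cache = {}
--     stack = [(m, n, False)]
--     while stack:
--         i, j, ready = stack.pop()
--         if (i, j) in cache and not ready:
--             continue
--         if i == 0:
--             cache[(i, j)] = j
--         elif j == 0:
--             cache[(i, j)] = i
--         elif ready:
--             cost = 0 if expected[i - 1] == values[j - 1] else 1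
--             cache[(i, j)] = min(
--                 cache[(i - 1, j)] + 1, cache[(i, j - 1)] + 1, cache[(i - 1, j - 1)] + cost
--             )
--         else:
--             stack.append((i, j, True))
--             if (i - 1, j) not in cache:
--                 stack.append((i - 1, j, False))
--             if (i, j - 1) not in cache:
--                 stack.append((i, j - 1, False))
--             if (i - 1, j - 1) not in cache:
--                 stack.append((i - 1, j - 1, False))
--     first_diff = next((k for k, (a, b) in enumerate(zip(expected, values)) if a != b), None)
--     return dict(first_diff=first_diff, delta_length=n - m, expected_length=m, total_diff=cache[(m, n)])
-- ===== Notes on version B (the rewrite author's own statement) =====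
-- stated objective: alternative
-- what changed: B replaces A's bottom-up (m+1)x(n+1) DP table with a demand-driven top-down evaluation of the same Levenshtein recurrence: an explicit work stack with expand/compute phases and a dict cache keyed by (i,j), and first_diff is taken with next() over a generator instead of a loop with a break.
import Mathlib
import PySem

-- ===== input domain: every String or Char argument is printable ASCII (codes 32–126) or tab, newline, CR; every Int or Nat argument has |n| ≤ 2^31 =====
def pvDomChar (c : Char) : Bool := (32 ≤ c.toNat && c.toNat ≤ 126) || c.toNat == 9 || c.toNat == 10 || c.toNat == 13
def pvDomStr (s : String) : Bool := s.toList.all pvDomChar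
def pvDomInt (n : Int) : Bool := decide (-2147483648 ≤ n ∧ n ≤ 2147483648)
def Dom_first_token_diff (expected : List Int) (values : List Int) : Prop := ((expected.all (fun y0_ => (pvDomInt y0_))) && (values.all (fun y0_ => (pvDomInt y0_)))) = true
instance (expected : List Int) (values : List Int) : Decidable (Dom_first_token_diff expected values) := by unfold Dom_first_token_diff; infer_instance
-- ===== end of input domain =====

-- B replaces A's bottom-up (m+1)x(n+1) DP table (helper edit_distance) with a demand-driven
-- top-down evaluation of the same recurrence: an explicit work stack with expand/compute
-- phases and a dict cache keyed by (i, j); first_diff comes from next() over a generator.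

-- ===== PORT A =====
-- dp[i][j] read/write on the 2D list; every index used is nonnegative and in range, so
-- List.set / List.getD on .toNat are exact for Python's list indexing here.
def pvGet2 (dp : List (List Int)) (i j : Int) : Int := (dp.getD i.toNat []).getD j.toNat 0

def pvSet2 (dp : List (List Int)) (i j v : Int) : List (List Int) :=
  dp.set i.toNat ((dp.getD i.toNat []).set j.toNat v)

-- table allocation and the two base-case initialization loops of edit_distance
def pvDpInit (m n : Int) : List (List Int) :=
  let dp := List.replicate (m.toNat + 1) (List.replicate (n.toNat + 1) (0 : Int))
  let dp := (PySem.List.pyRange 0 (m + 1)).foldl (fun dp i => pvSet2 dp i 0 i) dp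
  (PySem.List.pyRange 0 (n + 1)).foldl (fun dp j => pvSet2 dp 0 j j) dp

-- body of the nested fill loop: dp[i][j] = min(dp[i-1][j]+1, dp[i][j-1]+1, dp[i-1][j-1]+cost)
def pvFillCell (str1 str2 : List Int) (i : Int) (dp : List (List Int)) (j : Int) : List (List Int) :=
  let cost : Int := if PySem.List.pyGetD str1 (i - 1) 0 = PySem.List.pyGetD str2 (j - 1) 0 then 0 else 1
  pvSet2 dp i j (min (pvGet2 dp (i - 1) j + 1) (min (pvGet2 dp i (j - 1) + 1) (pvGet2 dp (i - 1) (j - 1) + cost)))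

def edit_distance (str1 str2 : List Int) : Int :=
  let m : Int := str1.length
  let n : Int := str2.length
  let dp := pvDpInit m n
  let dp := (PySem.List.pyRange 1 (m + 1)).foldl
    (fun dp i => (PySem.List.pyRange 1 (n + 1)).foldl (pvFillCell str1 str2 i) dp) dp
  pvGet2 dp m n

-- the 'for i, (a, b) in enumerate(zip(expected, values))' loop with its break
def pvFirstDiffLoop : List (Int × Int × Int) → Option Int
  | [] => none
  | x :: rest => if x.2.1 ≠ x.2.2 then some x.1 else pvFirstDiffLoop rest

def first_token_diff (expected : List Int) (values : List Int) : List (String × Option Int) :=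
  let delta_length : Int := (values.length : Int) - (expected.length : Int)
  let first_diff := pvFirstDiffLoop (PySem.List.enumerate (expected.zip values) 0)
  let total_diff := edit_distance expected values
  [("first_diff", first_diff), ("delta_length", some delta_length),
   ("expected_length", some (expected.length : Int)), ("total_diff", some total_diff)]

-- ===== PORT B =====
-- termination weight of one stack entry (the while loop terminates: an expand step trades
-- an entry of weight 4^(i+j+1) for at most three deps of weight ≤ 4^(i+j) plus a ready entry)
def pvCellW : Nat × Nat × Bool → Nat
  | (i, j, ready) => if ready then 1 else 4 ^ (i + j + 1)

-- the 'while stack:' loop of B; entries are the (i, j, ready) tuples pushed by Python.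
-- All indices stay nonnegative (i-1/j-1 only taken behind the i==0/j==0 guards), so Nat is
-- exact for them; in the ready branch every cache[...] lookup is guaranteed to hit (the deps
-- were cached or pushed above this entry), so getD _ 0 is exact for Python's cache[...].
def pvEdLoop (expected values : List Int) : List (Nat × Nat × Bool) → PySem.Dict (Nat × Nat) Int → PySem.Dict (Nat × Nat) Int
  | [], cache => cache
  | (i, j, ready) :: rest, cache =>
    if cache.contains (i, j) && !ready then pvEdLoop expected values rest cache
    else if i = 0 then pvEdLoop expected values rest (cache.insert (i, j) (j : Int))
    else if j = 0 then pvEdLoop expected values rest (cache.insert (i, j) (i : Int))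
    else if ready then
      let cost : Int := if PySem.List.pyGetD expected ((i : Int) - 1) 0 = PySem.List.pyGetD values ((j : Int) - 1) 0 then 0 else 1
      pvEdLoop expected values rest (cache.insert (i, j)
        (min (cache.getD (i - 1, j) 0 + 1) (min (cache.getD (i, j - 1) 0 + 1) (cache.getD (i - 1, j - 1) 0 + cost))))
    else
      let s1 := (i, j, true) :: rest
      let s2 := if cache.contains (i - 1, j) then s1 else (i - 1, j, false) :: s1
      let s3 := if cache.contains (i, j - 1) then s2 else (i, j - 1, false) :: s2
      let s4 := if cache.contains (i - 1, j - 1) then s3 else (i - 1, j - 1, false) :: s3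
      pvEdLoop expected values s4 cache
termination_by stack _ => (stack.map pvCellW).sum
decreasing_by
  · simp [pvCellW]; positivity
  · simp [pvCellW]; positivity
  · simp [pvCellW]; positivity
  · simp [pvCellW]; positivity
  · rename_i hskip hi hj hready
    have h1 : 1 ≤ i := Nat.one_le_iff_ne_zero.mpr hi
    have h2 : 1 ≤ j := Nat.one_le_iff_ne_zero.mpr hj
    have e1 : (i - 1) + j + 1 = i + j := by omega
    have e2 : i + (j - 1) + 1 = i + j := by omega
    have e3 : (i - 1) + (j - 1) + 1 ≤ i + j := by omega
    have hp : 16 ≤ 4 ^ (i + j) := by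
      calc (16 : Nat) = 4 ^ 2 := by norm_num
      _ ≤ 4 ^ (i + j) := Nat.pow_le_pow_right (by norm_num) (by omega)
    have hp3 : 4 ^ ((i - 1) + (j - 1) + 1) ≤ 4 ^ (i + j) := Nat.pow_le_pow_right (by norm_num) e3
    have hsucc : 4 ^ (i + j + 1) = 4 ^ (i + j) * 4 := pow_succ 4 (i + j)
    simp only [Bool.not_eq_true] at hready
    subst hready
    split_ifs <;> simp [pvCellW, e1, e2] <;> omega

def first_token_diff_alt (expected : List Int) (values : List Int) : List (String × Option Int) :=
  let m : Nat := expected.length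
  let n : Nat := values.length
  let cache := pvEdLoop expected values [(m, n, false)] PySem.Dict.empty
  -- next((k for k, (a, b) in enumerate(zip(expected, values)) if a != b), None)
  let first_diff : Option Int := ((expected.zip values).findIdx? (fun p => p.1 != p.2)).map (fun (k : Nat) => (k : Int))
  [("first_diff", first_diff), ("delta_length", some ((n : Int) - (m : Int))),
   ("expected_length", some (m : Int)), ("total_diff", some (cache.getD (m, n) 0))]

-- ===== PRECONDITION & SPEC =====
def Spec_first_token_diff (expected : List Int) (values : List Int) (out : List (String × Option Int)) : Prop := out = first_token_diff_alt expected values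
instance (expected : List Int) (values : List Int) (out : List (String × Option Int)) : Decidable (Spec_first_token_diff expected values out) := by unfold Spec_first_token_diff; infer_instance

-- ===== CLAIM (what is proved, stated in full; the proofs are below) =====
def Claim_equal_first_token_diff : Prop := ∀ (expected : List Int) (values : List Int), Dom_first_token_diff expected values → Spec_first_token_diff expected values (first_token_diff expected values)

-- ===== LEMMAS AND PROOFS =====

-- the Levenshtein recurrence both programs evaluate (proof-only specification)
def pvED (expected values : List Int) : Nat → Nat → Int
  | 0, j => (j : Int)
  | i+1, 0 => ((i : Int) + 1)
  | i+1, j+1 =>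
    let cost : Int := if expected.getD i 0 = values.getD j 0 then 0 else 1
    min (pvED expected values i (j+1) + 1) (min (pvED expected values (i+1) j + 1) (pvED expected values i j + cost))

-- proof-only description of how A's inner loop turns the previous row into the next row
def pvRowBStep (values : List Int) (a : Int) (prev cur : List Int) (j : Int) : List Int :=
  let cost : Int := if a = PySem.List.pyGetD values (j - 1) 0 then 0 else 1
  cur ++ [min (PySem.List.pyGetD prev j 0 + 1)
    (min (PySem.List.pyGetD cur (j - 1) 0 + 1) (PySem.List.pyGetD prev (j - 1) 0 + cost))]

def pvRowB (values : List Int) (a : Int) (prev : List Int) (i : Int) : List Int :=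
  (PySem.List.pyRange 1 ((values.length : Int) + 1)).foldl (pvRowBStep values a prev) [i]

-- the row of pvED values at a fixed i
def pvRowE (expected values : List Int) (i : Nat) : List Int :=
  (List.range (values.length + 1)).map (fun j => pvED expected values i j)

theorem pvGetD_set_ne {α : Type} (l : List α) (i j : Nat) (v d : α) (h : i ≠ j) :
    (l.set i v).getD j d = l.getD j d := by
  simp [List.getD]; rw [List.getElem?_set_ne h]

theorem pvGetD_set_self {α : Type} (l : List α) (i : Nat) (v d : α) (h : i < l.length) :
    (l.set i v).getD i d = v := by
  simp [List.getD, h]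

-- fold over range(a, b) with an indexed invariant
theorem pvPyRangeInv {α : Type} (f : α → Int → α) (P : Int → α → Prop) (a b : Int) (hab : a ≤ b)
    (step : ∀ j s, a ≤ j → j < b → P j s → P (j + 1) (f s j)) :
    ∀ s, P a s → P b ((PySem.List.pyRange a b).foldl f s) := by
  obtain ⟨k, hk⟩ : ∃ k : Nat, (b - a).toNat = k := ⟨_, rfl⟩
  induction k generalizing a with
  | zero =>
    intro s hs
    have hba : b = a := by omega
    rw [hba, PySem.List.pyRange_one_eq_nil le_rfl]
    simpa [hba] using hs
  | succ k ih =>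
    intro s hs
    have hab' : a < b := by omega
    rw [PySem.List.pyRange_one_cons hab']
    simp only [List.foldl_cons]
    exact ih (a + 1) (by omega) (fun j s h1 h2 => step j s (by omega) h2) (by omega)
      (f s a) (step a s le_rfl hab' hs)

-- invariant tying A's table to the current previous row after filling rows 1..k
def pvRel (expected values : List Int) (k : Int) (dp : List (List Int)) (prev : List Int) : Prop :=
  dp.length = expected.length + 1 ∧ prev.length = values.length + 1 ∧
  dp.getD k.toNat [] = prev ∧
  ∀ i' : Nat, k.toNat < i' → i' ≤ expected.length →
    dp.getD i' [] = ((i' : Int) :: List.replicate values.length 0)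

theorem pvInit_rel (expected values : List Int) :
    pvRel expected values 0 (pvDpInit (expected.length : Int) (values.length : Int))
      (PySem.List.pyRange 0 ((values.length : Int) + 1)) := by
  have h1 := pvPyRangeInv (fun dp i => pvSet2 dp i 0 i)
    (fun j dp => dp.length = expected.length + 1 ∧
      (∀ i' : Nat, (i' : Int) < j → i' ≤ expected.length →
        dp.getD i' [] = ((i' : Int) :: List.replicate values.length 0)) ∧
      (∀ i' : Nat, j ≤ (i' : Int) → i' ≤ expected.length →
        dp.getD i' [] = List.replicate (values.length + 1) 0))
    0 ((expected.length : Int) + 1) (by positivity)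
    (by
      intro j dp h0j hjm ⟨hlen, hlt, hge⟩
      have hjn : j.toNat < expected.length + 1 := by omega
      have hrow : dp.getD j.toNat [] = List.replicate (values.length + 1) 0 :=
        hge j.toNat (by omega) (by omega)
      refine ⟨by simp [pvSet2, hlen], ?_, ?_⟩
      · intro i' hi' him
        by_cases hij : i' = j.toNat
        · subst hij
          simp only [pvSet2, Int.toNat_zero, hrow]
          rw [pvGetD_set_self _ _ _ _ (by simp [hlen]; omega)]
          rw [List.replicate_succ, List.set_cons_zero]
          congr 1
          omega
        · simp only [pvSet2]
          rw [pvGetD_set_ne _ _ _ _ _ (fun h => hij h.symm)]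
          exact hlt i' (by omega) him
      · intro i' hi' him
        simp only [pvSet2]
        rw [pvGetD_set_ne _ _ _ _ _ (by omega)]
        exact hge i' (by omega) him)
    (List.replicate (expected.length + 1) (List.replicate (values.length + 1) (0 : Int)))
    (by
      refine ⟨by simp, fun i' h _ => by omega, fun i' _ h => ?_⟩
      simp [List.getD, Nat.lt_succ_of_le h])
  obtain ⟨hlen1, hrows1, _⟩ := h1
  have hall1 : ∀ i' : Nat, i' ≤ expected.length →
      ((PySem.List.pyRange 0 ((expected.length : Int) + 1)).foldl (fun dp i => pvSet2 dp i 0 i)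
        (List.replicate (expected.length + 1) (List.replicate (values.length + 1) (0 : Int)))).getD i' []
        = ((i' : Int) :: List.replicate values.length 0) := by
    intro i' h
    exact hrows1 i' (by exact_mod_cast by omega) h
  have h2 := pvPyRangeInv (fun dp j => pvSet2 dp 0 j j)
    (fun j dp => dp.length = expected.length + 1 ∧
      dp.getD 0 [] = PySem.List.pyRange 0 j ++ List.replicate (values.length + 1 - j.toNat) 0 ∧
      (∀ i' : Nat, 1 ≤ i' → i' ≤ expected.length →
        dp.getD i' [] = ((i' : Int) :: List.replicate values.length 0)))
    0 ((values.length : Int) + 1) (by positivity)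
    (by
      intro j dp h0j hjn ⟨hlen, hrow0, hrest⟩
      have hjt : j.toNat ≤ values.length := by omega
      refine ⟨by simp [pvSet2, hlen], ?_, ?_⟩
      · simp only [pvSet2, Int.toNat_zero]
        rw [pvGetD_set_self _ _ _ _ (by simp [hlen])]
        rw [hrow0, List.set_append]
        have hlenr : (PySem.List.pyRange 0 j).length = j.toNat := by
          rw [PySem.List.length_pyRange_one]; omega
        rw [if_neg (by omega)]
        have hrep : values.length + 1 - j.toNat = (values.length - j.toNat) + 1 := by omega
        rw [hlenr, Nat.sub_self, hrep, List.replicate_succ, List.set_cons_zero]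
        rw [PySem.List.pyRange_one_succ_right h0j]
        have : values.length + 1 - (j + 1).toNat = values.length - j.toNat := by omega
        rw [this, List.append_assoc]
        simp
      · intro i' h1i him
        simp only [pvSet2]
        rw [pvGetD_set_ne _ _ _ _ _ (by omega)]
        exact hrest i' h1i him)
    _
    (by
      refine ⟨hlen1, ?_, fun i' h1i him => hall1 i' him⟩
      rw [hall1 0 (by omega)]
      simp [PySem.List.pyRange_one_eq_nil le_rfl, List.replicate_succ])
  obtain ⟨hlen2, hrow02, hrest2⟩ := h2
  refine ⟨?_, ?_, ?_, ?_⟩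
  · simpa [pvDpInit] using hlen2
  · rw [PySem.List.length_pyRange_one]; omega
  · show (pvDpInit _ _).getD (0 : Int).toNat [] = _
    simp only [pvDpInit, Int.toNat_natCast, Int.toNat_zero]
    rw [hrow02]
    simp
  · intro i' h0i him
    show (pvDpInit _ _).getD i' [] = _
    simp only [pvDpInit, Int.toNat_natCast]
    exact hrest2 i' (by omega) him

theorem pvStep_rel (expected values : List Int) (i : Int) (hi1 : 1 ≤ i)
    (him : i ≤ (expected.length : Int)) (dp : List (List Int)) (prev : List Int)
    (h : pvRel expected values (i - 1) dp prev) :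
    pvRel expected values i
      ((PySem.List.pyRange 1 ((values.length : Int) + 1)).foldl (pvFillCell expected values i) dp)
      (pvRowB values (expected.getD (i - 1).toNat 0) prev i) := by
  obtain ⟨hlen, hplen, hprev, hinit⟩ := h
  have hitm : i.toNat ≤ expected.length := by omega
  have hitlt : i.toNat < dp.length := by omega
  have hine : (i - 1).toNat ≠ i.toNat := by omega
  have hrowi : dp.getD i.toNat [] = (i :: List.replicate values.length 0) := by
    have := hinit i.toNat (by omega) hitm
    rw [this]
    congr 1
    omega
  have hPair := pvPyRangeInv
    (fun (p : List (List Int) × List Int) j =>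
      (pvFillCell expected values i p.1 j,
        pvRowBStep values (expected.getD (i - 1).toNat 0) prev p.2 j))
    (fun j p => p.2.length = j.toNat ∧
      p.1 = dp.set i.toNat (p.2 ++ List.replicate (values.length + 1 - j.toNat) 0))
    1 ((values.length : Int) + 1) (by omega)
    (by
      intro j p h1j hjn ⟨hclen, hp1⟩
      simp only [pvRowBStep]
      have hjt1 : 1 ≤ j.toNat := by omega
      have hjtn : j.toNat ≤ values.length := by omega
      -- the three reads agree
      have hread1 : pvGet2 p.1 (i - 1) j = PySem.List.pyGetD prev j 0 := by
        rw [pvGet2, hp1, pvGetD_set_ne _ _ _ _ _ (by omega), hprev,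
          PySem.List.pyGetD_of_nonneg _ _ (by omega)]
      have hrowval : p.1.getD i.toNat [] = p.2 ++ List.replicate (values.length + 1 - j.toNat) 0 := by
        rw [hp1, pvGetD_set_self _ _ _ _ hitlt]
      have hread2 : pvGet2 p.1 i (j - 1) = PySem.List.pyGetD p.2 (j - 1) 0 := by
        rw [pvGet2, hrowval, List.getD_append _ _ _ _ (by omega),
          PySem.List.pyGetD_of_nonneg _ _ (by omega)]
      have hread3 : pvGet2 p.1 (i - 1) (j - 1) = PySem.List.pyGetD prev (j - 1) 0 := by
        rw [pvGet2, hp1, pvGetD_set_ne _ _ _ _ _ (by omega), hprev,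
          PySem.List.pyGetD_of_nonneg _ _ (by omega)]
      have hcost : PySem.List.pyGetD expected (i - 1) 0 = expected.getD (i - 1).toNat 0 :=
        PySem.List.pyGetD_of_nonneg _ _ (by omega)
      constructor
      · simp only [List.length_append, List.length_cons, List.length_nil, hclen]; omega
      · simp only [pvFillCell, pvSet2, hcost, hread1, hread2, hread3]
        rw [hp1, List.set_set, pvGetD_set_self _ _ _ _ hitlt]
        congr 1
        rw [List.set_append, if_neg (by omega), hclen, Nat.sub_self]
        have hrep : values.length + 1 - j.toNat = (values.length - j.toNat) + 1 := by omega
        rw [hrep, List.replicate_succ, List.set_cons_zero, List.append_assoc]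
        have : values.length + 1 - (j + 1).toNat = values.length - j.toNat := by omega
        rw [this]
        rfl)
    (dp, [i])
    (by
      refine ⟨by simp, ?_⟩
      have : ([i] ++ List.replicate (values.length + 1 - (1 : Int).toNat) 0 : List Int)
          = i :: List.replicate values.length 0 := by simp
      rw [this, ← hrowi]
      show dp = dp.set i.toNat (dp.getD i.toNat [])
      rw [List.getD_eq_getElem dp [] hitlt, List.set_getElem_self])
  rw [PySem.List.foldl_prod_mk] at hPair
  obtain ⟨hclen, hfin⟩ := hPair
  dsimp only at hclen hfin
  rw [show (PySem.List.pyRange 1 ((values.length : Int) + 1)).foldl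
      (pvRowBStep values (expected.getD (i - 1).toNat 0) prev) [i]
      = pvRowB values (expected.getD (i - 1).toNat 0) prev i from rfl] at hclen hfin
  have hrep0 : values.length + 1 - ((values.length : Int) + 1).toNat = 0 := by omega
  rw [hrep0, List.replicate_zero, List.append_nil] at hfin
  refine ⟨by rw [hfin]; simp [hlen], ?_, ?_, ?_⟩
  · rw [hclen]; omega
  · rw [hfin, pvGetD_set_self _ _ _ _ (by simp [hlen]; omega)]
  · intro i' hi' him'
    rw [hfin, pvGetD_set_ne _ _ _ _ _ (by omega)]
    exact hinit i' (by omega) him'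

theorem pvOuter (expected values : List Int) : ∀ (l : List Int) (s : Int), 1 ≤ s →
    l = expected.drop (s - 1).toNat → (s - 1).toNat + l.length = expected.length →
    ∀ dp prev, pvRel expected values (s - 1) dp prev →
    pvRel expected values (expected.length : Int)
      ((PySem.List.pyRange s ((expected.length : Int) + 1)).foldl
        (fun dp i => (PySem.List.pyRange 1 ((values.length : Int) + 1)).foldl (pvFillCell expected values i) dp) dp)
      ((PySem.List.enumerate l s).foldl (fun p ia => pvRowB values ia.2 p ia.1) prev) := by
  intro l
  induction l with
  | nil =>
    intro s hs hdrop hlen dp prev h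
    simp only [List.length_nil, Nat.add_zero] at hlen
    have hse : s = (expected.length : Int) + 1 := by omega
    subst hse
    rw [PySem.List.pyRange_one_eq_nil le_rfl]
    simp only [PySem.List.enumerate, List.foldl_nil]
    rw [show (expected.length : Int) = (expected.length : Int) + 1 - 1 by ring]
    exact h
  | cons a l' ih =>
    intro s hs hdrop hlen dp prev h
    simp only [List.length_cons] at hlen
    have hlt : (s - 1).toNat < expected.length := by omega
    have hsm : s ≤ (expected.length : Int) := by omega
    rw [List.drop_eq_getElem_cons hlt] at hdrop
    have ha : a = expected[(s - 1).toNat] := by injection hdrop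
    have hl' : l' = expected.drop ((s - 1).toNat + 1) := by injection hdrop
    have haD : a = expected.getD (s - 1).toNat 0 := by
      rw [ha, List.getD_eq_getElem expected 0 hlt]
    rw [PySem.List.pyRange_one_cons (a := s) (b := (expected.length : Int) + 1) (by omega),
      PySem.List.enumerate_cons]
    simp only [List.foldl_cons]
    have hstep := pvStep_rel expected values s hs hsm dp prev h
    have hrec := ih (s + 1) (by omega)
      (by rw [hl']; congr 1; omega)
      (by omega)
      ((PySem.List.pyRange 1 ((values.length : Int) + 1)).foldl (pvFillCell expected values s) dp)
      (pvRowB values a prev s)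
      (by
        have h1 : s + 1 - 1 = s := by omega
        rw [h1, haD]
        exact hstep)
    exact hrec

theorem pvFirstDiff (l : List (Int × Int)) : ∀ s : Int,
    pvFirstDiffLoop (PySem.List.enumerate l s) =
      (l.findIdx? (fun p => p.1 != p.2)).map (fun (k : Nat) => (k : Int) + s) := by
  induction l with
  | nil => intro s; simp [PySem.List.enumerate, pvFirstDiffLoop]
  | cons x xs ih =>
    intro s
    rw [PySem.List.enumerate_cons, List.findIdx?_cons]
    by_cases hx : x.1 = x.2
    · rw [show pvFirstDiffLoop ((s, x) :: PySem.List.enumerate xs (s + 1))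
          = pvFirstDiffLoop (PySem.List.enumerate xs (s + 1)) from by simp [pvFirstDiffLoop, hx]]
      rw [ih (s + 1), show (x.1 != x.2) = false from by simp [hx]]
      simp only [Bool.false_eq_true, if_false]
      cases List.findIdx? (fun p => p.1 != p.2) xs with
      | none => rfl
      | some k =>
        simp only [Option.map_some]
        congr 1
        push_cast
        ring
    · simp [pvFirstDiffLoop, hx]

-- ========== bridge: A's rows are the pvED rows ==========

theorem pvMapRange_get (f : Nat → Int) (m k : Nat) (h : k < m) :
    PySem.List.pyGetD ((List.range m).map f) ((k : Nat) : Int) 0 = f k := by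
  rw [PySem.List.pyGetD_natCast]
  simp [List.getD, List.getElem?_map, List.getElem?_range, h]

theorem pvRowE_zero (expected values : List Int) :
    PySem.List.pyRange 0 ((values.length : Int) + 1) = pvRowE expected values 0 := by
  rw [show ((values.length : Int) + 1) = (((values.length + 1 : Nat) : Int)) by push_cast; ring]
  rw [PySem.List.pyRange_zero_natCast]
  unfold pvRowE
  apply List.map_congr_left
  intro k _
  simp [pvED]

theorem pvRowB_rowE (expected values : List Int) (i : Nat) :
    pvRowB values (expected.getD i 0) (pvRowE expected values i) ((i : Int) + 1)
      = pvRowE expected values (i + 1) := by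
  have h := pvPyRangeInv (pvRowBStep values (expected.getD i 0) (pvRowE expected values i))
    (fun j cur => cur = (List.range j.toNat).map (fun k => pvED expected values (i + 1) k))
    1 ((values.length : Int) + 1) (by omega)
    (by
      intro j cur h1j hjn hcur
      obtain ⟨l, hl⟩ : ∃ l, j.toNat = l + 1 := ⟨j.toNat - 1, by omega⟩
      have hjl : j = (((l + 1 : Nat) : Int)) := by omega
      have hln : l + 1 < values.length + 1 := by omega
      simp only [pvRowBStep]
      have hr1 : PySem.List.pyGetD (pvRowE expected values i) j 0 = pvED expected values i (l + 1) := by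
        rw [hjl]; exact pvMapRange_get _ _ _ hln
      have hr2 : PySem.List.pyGetD cur (j - 1) 0 = pvED expected values (i + 1) l := by
        rw [hcur, show j - 1 = ((l : Nat) : Int) by omega]
        exact pvMapRange_get _ _ _ (by omega)
      have hr3 : PySem.List.pyGetD (pvRowE expected values i) (j - 1) 0 = pvED expected values i l := by
        rw [show j - 1 = ((l : Nat) : Int) by omega]
        exact pvMapRange_get _ _ _ (by omega)
      have hr4 : PySem.List.pyGetD values (j - 1) 0 = values.getD l 0 := by
        rw [show j - 1 = ((l : Nat) : Int) by omega, PySem.List.pyGetD_natCast]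
      rw [hr1, hr2, hr3, hr4, hcur]
      rw [show (j + 1).toNat = (l + 1) + 1 by omega, hl]
      have hre : pvED expected values (i + 1) (l + 1) =
          min (pvED expected values i (l + 1) + 1)
            (min (pvED expected values (i + 1) l + 1)
              (pvED expected values i l + if expected.getD i 0 = values.getD l 0 then 0 else 1)) := by
        rw [pvED]
      rw [List.range_succ (n := l + 1), List.map_append, List.range_succ (n := l), List.map_append]
      simp [hre]
    )
    [((i : Int) + 1)]
    (by simp [pvED])
  unfold pvRowB
  rw [h, show (((values.length : Int) + 1)).toNat = values.length + 1 by omega]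
  rfl

theorem pvOuterB (expected values : List Int) : ∀ (l : List Int) (s : Nat),
    l = expected.drop s → s ≤ expected.length →
    (PySem.List.enumerate l ((s : Int) + 1)).foldl (fun p ia => pvRowB values ia.2 p ia.1)
      (pvRowE expected values s) = pvRowE expected values expected.length := by
  intro l
  induction l with
  | nil =>
    intro s hdrop hs
    have : expected.length ≤ s := by
      have := congrArg List.length hdrop
      simp at this
      omega
    have hse : s = expected.length := by omega
    subst hse
    simp [PySem.List.enumerate]
  | cons a l' ih =>
    intro s hdrop hs
    have hlt : s < expected.length := by
      have := congrArg List.length hdrop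
      simp at this
      omega
    rw [List.drop_eq_getElem_cons hlt] at hdrop
    have ha : a = expected[s] := by injection hdrop
    have hl' : l' = expected.drop (s + 1) := by injection hdrop
    have haD : a = expected.getD s 0 := by rw [ha, List.getD_eq_getElem expected 0 hlt]
    rw [PySem.List.enumerate_cons]
    simp only [List.foldl_cons]
    rw [haD, pvRowB_rowE expected values s]
    have hcast : ((s : Int) + 1 + 1) = (((s + 1 : Nat) : Int) + 1) := by push_cast; ring
    rw [hcast]
    exact ih (s + 1) hl' (by omega)

-- ========== B's machine computes pvED ==========

def pvDeps (i j : Nat) : List (Nat × Nat) := [(i - 1, j), (i, j - 1), (i - 1, j - 1)]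

def pvValid (expected values : List Int) (c : PySem.Dict (Nat × Nat) Int) : Prop :=
  ∀ i j v, c.get? (i, j) = some v → v = pvED expected values i j

def pvWFa (c : PySem.Dict (Nat × Nat) Int) (seen : List (Nat × Nat)) : List (Nat × Nat × Bool) → Prop
  | [] => True
  | (i, j, ready) :: rest =>
    (ready = true → ∀ d ∈ pvDeps i j, (c.get? d).isSome = true ∨ d ∈ seen) ∧
    pvWFa c ((i, j) :: seen) rest

theorem pvWFa_mono (c c' : PySem.Dict (Nat × Nat) Int) (seen seen' : List (Nat × Nat))
    (hc : ∀ k, (c.get? k).isSome = true → (c'.get? k).isSome = true)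
    (hs : ∀ d ∈ seen, (c'.get? d).isSome = true ∨ d ∈ seen') :
    ∀ s, pvWFa c seen s → pvWFa c' seen' s := by
  intro s
  induction s generalizing seen seen' with
  | nil => intro _; trivial
  | cons e rest ih =>
    obtain ⟨i, j, ready⟩ := e
    intro ⟨h1, h2⟩
    refine ⟨fun hr d hd => ?_, ?_⟩
    · rcases h1 hr d hd with h | h
      · exact Or.inl (hc _ h)
      · exact hs d h
    · refine ih ((i, j) :: seen) ((i, j) :: seen') ?_ h2
      intro d hd
      rcases List.mem_cons.mp hd with rfl | hd
      · exact Or.inr (List.mem_cons_self)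
      · rcases hs d hd with h | h
        · exact Or.inl h
        · exact Or.inr (List.mem_cons_of_mem _ h)

theorem pvInsertStep (expected values : List Int) (i j : Nat) (ready : Bool)
    (rest : List (Nat × Nat × Bool)) (cache : PySem.Dict (Nat × Nat) Int) (v : Int)
    (hv : pvValid expected values cache) (hw2 : pvWFa cache [(i, j)] rest)
    (hval : v = pvED expected values i j)
    (ih : pvValid expected values (cache.insert (i, j) v) →
      pvWFa (cache.insert (i, j) v) [] rest →
      pvValid expected values (pvEdLoop expected values rest (cache.insert (i, j) v)) ∧
      (∀ k, ((cache.insert (i, j) v).get? k).isSome = true →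
        ((pvEdLoop expected values rest (cache.insert (i, j) v)).get? k).isSome = true) ∧
      (∀ e ∈ rest, ((pvEdLoop expected values rest (cache.insert (i, j) v)).get? (e.1, e.2.1)).isSome = true)) :
    pvValid expected values (pvEdLoop expected values rest (cache.insert (i, j) v)) ∧
    (∀ k, (cache.get? k).isSome = true →
      ((pvEdLoop expected values rest (cache.insert (i, j) v)).get? k).isSome = true) ∧
    (∀ e ∈ (i, j, ready) :: rest, ((pvEdLoop expected values rest (cache.insert (i, j) v)).get? (e.1, e.2.1)).isSome = true) := by
  have hmono : ∀ k, (cache.get? k).isSome = true → ((cache.insert (i, j) v).get? k).isSome = true := by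
    intro k hk
    rw [PySem.Dict.get?_insert]
    split_ifs <;> simp [hk]
  have hvalid' : pvValid expected values (cache.insert (i, j) v) := by
    intro a b w hw'
    rw [PySem.Dict.get?_insert] at hw'
    split_ifs at hw' with hk
    · rw [Prod.mk.injEq] at hk
      obtain ⟨rfl, rfl⟩ := hk
      rw [← Option.some.inj hw', hval]
    · exact hv _ _ _ hw'
  have hself : ((cache.insert (i, j) v).get? (i, j)).isSome = true := by
    rw [PySem.Dict.get?_insert_self]
    rfl
  have hw' : pvWFa (cache.insert (i, j) v) [] rest :=
    pvWFa_mono cache _ [(i, j)] [] hmono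
      (by intro d hd; simp only [List.mem_singleton] at hd; subst hd; exact Or.inl hself) rest hw2
  obtain ⟨v1, v2, v3⟩ := ih hvalid' hw'
  refine ⟨v1, fun k hk => v2 k (hmono k hk), fun e he => ?_⟩
  rcases List.mem_cons.mp he with rfl | he
  · exact v2 _ hself
  · exact v3 e he

theorem pvEdLoop_main (expected values : List Int) (stack : List (Nat × Nat × Bool))
    (c : PySem.Dict (Nat × Nat) Int) :
    pvValid expected values c → pvWFa c [] stack →
    pvValid expected values (pvEdLoop expected values stack c) ∧
    (∀ k, (c.get? k).isSome = true → ((pvEdLoop expected values stack c).get? k).isSome = true) ∧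
    (∀ e ∈ stack, ((pvEdLoop expected values stack c).get? (e.1, e.2.1)).isSome = true) := by
  fun_induction pvEdLoop expected values stack c
  case case1 => intro hv hw; exact ⟨hv, fun k h => h, by simp⟩
  case case2 i j ready rest cache h ih =>
    intro hv hw
    obtain ⟨hw1, hw2⟩ := hw
    have hsome : (cache.get? (i, j)).isSome = true := by
      rw [← PySem.Dict.contains_eq_isSome_get?]
      simp only [Bool.and_eq_true] at h
      exact h.1
    obtain ⟨v1, v2, v3⟩ := ih hv (pvWFa_mono cache cache [(i, j)] [] (fun k hk => hk)
      (by intro d hd; simp only [List.mem_singleton] at hd; subst hd; exact Or.inl hsome) rest hw2)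
    refine ⟨v1, v2, fun e he => ?_⟩
    rcases List.mem_cons.mp he with rfl | he
    · exact v2 _ hsome
    · exact v3 e he
  case case3 j ready rest cache hskip ih =>
    intro hv hw
    obtain ⟨hw1, hw2⟩ := hw
    exact pvInsertStep expected values 0 j ready rest cache _ hv hw2 (by simp [pvED]) ih
  case case4 i ready rest cache hi hskip ih =>
    intro hv hw
    obtain ⟨hw1, hw2⟩ := hw
    refine pvInsertStep expected values i 0 ready rest cache _ hv hw2 ?_ ih
    obtain ⟨k, rfl⟩ : ∃ k, i = k + 1 := ⟨i - 1, by omega⟩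
    simp [pvED]
  case case5 i j rest cache hi hj cost hskip ih =>
    intro hv hw
    obtain ⟨hw1, hw2⟩ := hw
    simp only [cost] at ih ⊢
    clear cost
    have hdeps := hw1 rfl
    have hd1 : (cache.get? (i - 1, j)).isSome = true := by
      rcases hdeps (i - 1, j) (by simp [pvDeps]) with h | h
      · exact h
      · simp at h
    have hd2 : (cache.get? (i, j - 1)).isSome = true := by
      rcases hdeps (i, j - 1) (by simp [pvDeps]) with h | h
      · exact h
      · simp at h
    have hd3 : (cache.get? (i - 1, j - 1)).isSome = true := by
      rcases hdeps (i - 1, j - 1) (by simp [pvDeps]) with h | h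
      · exact h
      · simp at h
    obtain ⟨a1, ha1⟩ := Option.isSome_iff_exists.mp hd1
    obtain ⟨a2, ha2⟩ := Option.isSome_iff_exists.mp hd2
    obtain ⟨a3, ha3⟩ := Option.isSome_iff_exists.mp hd3
    refine pvInsertStep expected values i j true rest cache _ hv hw2 ?_ ih
    obtain ⟨k, rfl⟩ : ∃ k, i = k + 1 := ⟨i - 1, by omega⟩
    obtain ⟨l, rfl⟩ : ∃ l, j = l + 1 := ⟨j - 1, by omega⟩
    simp only [Nat.add_sub_cancel] at ha1 ha2 ha3 ⊢
    rw [PySem.Dict.getD_of_get?_eq_some _ _ ha1, PySem.Dict.getD_of_get?_eq_some _ _ ha2,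
      PySem.Dict.getD_of_get?_eq_some _ _ ha3,
      hv _ _ _ ha1, hv _ _ _ ha2, hv _ _ _ ha3]
    rw [show ((k + 1 : Nat) : Int) - 1 = ((k : Nat) : Int) by push_cast; ring,
      show ((l + 1 : Nat) : Int) - 1 = ((l : Nat) : Int) by push_cast; ring,
      PySem.List.pyGetD_natCast, PySem.List.pyGetD_natCast]
    rw [pvED]
    split_ifs <;> rfl
  case case6 i j ready rest cache hskip hi hj hready s1 s2 s3 s4 ih =>
    intro hv hw
    obtain ⟨hw1, hw2⟩ := hw
    simp only [s4, s3, s2, s1] at ih ⊢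
    clear s4 s3 s2 s1
    cases hc1 : cache.contains (i - 1, j) <;> cases hc2 : cache.contains (i, j - 1) <;>
      cases hc3 : cache.contains (i - 1, j - 1) <;>
      simp only [hc1, hc2, hc3, Bool.false_eq_true, dite_false, dite_true] at ih ⊢ <;>
      (obtain ⟨v1, v2, v3⟩ := ih hv (by
          simp only [pvWFa]
          and_intros
          all_goals
            first
              | trivial
              | (intro hfalse; exact (Bool.false_ne_true hfalse).elim)
              | exact pvWFa_mono cache cache [(i, j)] _ (fun k hk => hk)
                  (by intro d hd; simp only [List.mem_singleton] at hd; subst hd; exact Or.inr (by simp)) rest hw2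
              | (intro d hd
                 simp only [pvDeps, List.mem_cons, List.not_mem_nil, or_false] at hd
                 rcases hd with rfl | rfl | rfl <;>
                   first
                     | exact Or.inl (by rw [← PySem.Dict.contains_eq_isSome_get?]; assumption)
                     | exact Or.inr (by simp))
              | (intro _ d hd
                 simp only [pvDeps, List.mem_cons, List.not_mem_nil, or_false] at hd
                 rcases hd with rfl | rfl | rfl <;>
                   first
                     | exact Or.inl (by rw [← PySem.Dict.contains_eq_isSome_get?]; assumption)
                     | exact Or.inr (by simp))
)
       refine ⟨v1, v2, fun e he => ?_⟩
       rcases List.mem_cons.mp he with rfl | he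
       · exact v3 (i, j, true) (by simp)
       · exact v3 e (by simp [he]))

theorem pvEdLoop_total (expected values : List Int) :
    (pvEdLoop expected values [(expected.length, values.length, false)] PySem.Dict.empty).getD
      (expected.length, values.length) 0 = pvED expected values expected.length values.length := by
  have h := pvEdLoop_main expected values [(expected.length, values.length, false)] PySem.Dict.empty
    (by intro i j v h; simp [PySem.Dict.get?_empty] at h)
    (by exact ⟨by simp, trivial⟩)
  obtain ⟨hv, _, hcov⟩ := h
  have hsome := hcov (expected.length, values.length, false) (List.mem_singleton.mpr rfl)
  obtain ⟨v, hvv⟩ := Option.isSome_iff_exists.mp hsome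
  rw [PySem.Dict.getD_of_get?_eq_some _ _ hvv]
  exact hv _ _ _ hvv

-- ===== VERDICT (by name: the statement is the Claim_ definition above) =====
theorem first_token_diff_spec : Claim_equal_first_token_diff := by
  intro expected values _
  unfold Spec_first_token_diff first_token_diff first_token_diff_alt
  have hfd : pvFirstDiffLoop (PySem.List.enumerate (expected.zip values) 0) =
      ((expected.zip values).findIdx? (fun p => p.1 != p.2)).map (fun (k : Nat) => (k : Int)) := by
    have h0 := pvFirstDiff (expected.zip values) 0
    simpa using h0
  have hrel := pvOuter expected values expected 1 le_rfl (by simp) (by simp)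
    (pvDpInit (expected.length : Int) (values.length : Int))
    (PySem.List.pyRange 0 ((values.length : Int) + 1))
    (by simpa using pvInit_rel expected values)
  obtain ⟨hlen, hplen, hrow, _⟩ := hrel
  have hed : edit_distance expected values =
      PySem.List.pyGetD ((PySem.List.enumerate expected 1).foldl
        (fun p ia => pvRowB values ia.2 p ia.1) (PySem.List.pyRange 0 ((values.length : Int) + 1)))
        (values.length : Int) 0 := by
    rw [PySem.List.pyGetD_of_nonneg _ _ (by positivity)]
    simp only [edit_distance, pvGet2, Int.toNat_natCast]
    norm_num [Int.toNat_natCast] at hrow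
    simp only [List.getD]
    rw [hrow]
  have hfold : (PySem.List.enumerate expected 1).foldl
      (fun p ia => pvRowB values ia.2 p ia.1) (PySem.List.pyRange 0 ((values.length : Int) + 1))
      = pvRowE expected values expected.length := by
    rw [pvRowE_zero expected values]
    have h := pvOuterB expected values expected 0 (by simp) (by omega)
    simpa using h
  have hedE : edit_distance expected values = pvED expected values expected.length values.length := by
    rw [hed, hfold]
    exact pvMapRange_get _ _ _ (by omega)
  dsimp only
  rw [hfd, hedE, pvEdLoop_total]
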